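-- pv_equiv track=rewrite | github.com/pebblepaw/MiroWorld | backend/scripts/generate_comprehensive_demo_cache.py | _summarize_experience
-- ===== SOURCE A (Python) =====
-- def _summarize_experience(interactions: list[dict]) -> str:
--     """Create a summary of agent's simulation experience."""
--     if not interactions:
--         return "No interactions during simulation."
--
--     posts = [i for i in interactions if i.get("action_type") == "post"]
--     comments = [i for i in interactions if i.get("action_type") == "comment"]
--     reactions = [i for i in interactions if i.get("action_type") in ("like", "dislike")]
--
--     return (
--         f"Made {len(posts)} posts, {len(comments)} comments, "
--         f"and {len(reactions)} reactions during the simulation."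
--     )
-- ===== SOURCE B (Python) =====
-- def _summarize_experience(interactions: list[dict]) -> str:
--     """Create a summary of agent's simulation experience."""
--     if not interactions:
--         return "No interactions during simulation."
--
--     posts = comments = reactions = 0
--     for i in interactions:
--         t = i.get("action_type")
--         if t == "post":
--             posts += 1
--         elif t == "comment":
--             comments += 1
--         elif t in ("like", "dislike"):
--             reactions += 1
--
--     return (
--         f"Made {posts} posts, {comments} comments, "
--         f"and {reactions} reactions during the simulation."
--     )
-- ===== Notes on version B (the rewrite author's own statement) =====
-- stated objective: alternative
-- what changed: Replaces three separate filter passes over the list with one single-pass loop maintaining three integer counters.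
import Mathlib
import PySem

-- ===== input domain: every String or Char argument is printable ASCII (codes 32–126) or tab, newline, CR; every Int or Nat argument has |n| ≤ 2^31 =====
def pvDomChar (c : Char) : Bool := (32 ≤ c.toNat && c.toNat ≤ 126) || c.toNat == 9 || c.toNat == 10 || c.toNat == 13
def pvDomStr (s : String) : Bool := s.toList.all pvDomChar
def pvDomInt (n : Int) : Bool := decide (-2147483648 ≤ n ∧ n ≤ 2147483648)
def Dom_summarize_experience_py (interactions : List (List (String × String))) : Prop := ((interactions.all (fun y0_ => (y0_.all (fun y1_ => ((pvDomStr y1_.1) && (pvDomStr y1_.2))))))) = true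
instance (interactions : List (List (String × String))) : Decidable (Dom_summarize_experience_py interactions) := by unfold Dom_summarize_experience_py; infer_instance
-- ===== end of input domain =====

-- B replaces A's three filter passes by one single-pass loop with three counters (objective: alternative decomposition).

-- shared helper: Python's i.get("action_type") on the association-list dict (first match)
def pvGetAction (i : List (String × String)) : Option String :=
  (i.find? (fun kv => kv.1 == "action_type")).map (·.2)

-- ===== PORT A =====
def summarize_experience_py (interactions : List (List (String × String))) : String :=
  if interactions = [] then "No interactions during simulation."
  else
    let posts := interactions.filter (fun i => pvGetAction i == some "post")
    let comments := interactions.filter (fun i => pvGetAction i == some "comment")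
    let reactions := interactions.filter (fun i =>
      pvGetAction i == some "like" || pvGetAction i == some "dislike")
    "Made " ++ PySem.Int.toStr (posts.length : Int) ++ " posts, " ++
      PySem.Int.toStr (comments.length : Int) ++ " comments, and " ++
      PySem.Int.toStr (reactions.length : Int) ++ " reactions during the simulation."

-- ===== PORT B =====
def pvStepB (acc : Int × Int × Int) (i : List (String × String)) : Int × Int × Int :=
  let t := pvGetAction i
  if t == some "post" then (acc.1 + 1, acc.2.1, acc.2.2)
  else if t == some "comment" then (acc.1, acc.2.1 + 1, acc.2.2)
  else if t == some "like" || t == some "dislike" then (acc.1, acc.2.1, acc.2.2 + 1)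
  else acc

def summarize_experience_py_alt (interactions : List (List (String × String))) : String :=
  if interactions = [] then "No interactions during simulation."
  else
    let c := interactions.foldl pvStepB (0, 0, 0)
    "Made " ++ PySem.Int.toStr c.1 ++ " posts, " ++
      PySem.Int.toStr c.2.1 ++ " comments, and " ++
      PySem.Int.toStr c.2.2 ++ " reactions during the simulation."

-- ===== PRECONDITION & SPEC =====
def Spec_summarize_experience_py (interactions : List (List (String × String))) (out : String) : Prop := out = summarize_experience_py_alt interactions
instance (interactions : List (List (String × String))) (out : String) : Decidable (Spec_summarize_experience_py interactions out) := by unfold Spec_summarize_experience_py; infer_instance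

-- ===== CLAIM (what is proved, stated in full; the proofs are below) =====
def Claim_equal_summarize_experience_py : Prop := ∀ (interactions : List (List (String × String))), Dom_summarize_experience_py interactions → Spec_summarize_experience_py interactions (summarize_experience_py interactions)

-- ===== LEMMAS AND PROOFS =====

-- loop invariant: the fold's counters are the starting counters plus the three filter lengths
lemma pvFold_eq (l : List (List (String × String))) :
    ∀ p c r : Int, l.foldl pvStepB (p, c, r) =
      (p + ((l.filter (fun i => pvGetAction i == some "post")).length : Int),
       c + ((l.filter (fun i => pvGetAction i == some "comment")).length : Int),
       r + ((l.filter (fun i =>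
          pvGetAction i == some "like" || pvGetAction i == some "dislike")).length : Int)) := by
  induction l with
  | nil => intro p c r; simp
  | cons x xs ih =>
    intro p c r
    by_cases h1 : pvGetAction x == some "post"
    · have hs : pvStepB (p, c, r) x = (p + 1, c, r) := by simp [pvStepB, h1]
      rw [List.foldl_cons, hs, ih]
      have h2 : ¬ (pvGetAction x == some "comment") := by simp_all
      have h3 : ¬ (pvGetAction x == some "like" || pvGetAction x == some "dislike") := by
        simp_all
      simp [h1, h2, h3, Prod.ext_iff]
      omega
    · by_cases h2 : pvGetAction x == some "comment"
      · have hs : pvStepB (p, c, r) x = (p, c + 1, r) := by simp [pvStepB, h1, h2]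
        rw [List.foldl_cons, hs, ih]
        have h3 : ¬ (pvGetAction x == some "like" || pvGetAction x == some "dislike") := by
          simp_all
        simp [h1, h2, h3, Prod.ext_iff]
        omega
      · by_cases h3 : pvGetAction x == some "like" || pvGetAction x == some "dislike"
        · have hs : pvStepB (p, c, r) x = (p, c, r + 1) := by simp [pvStepB, h1, h2, h3]
          rw [List.foldl_cons, hs, ih]
          simp [h1, h2, h3, Prod.ext_iff]
          omega
        · have hs : pvStepB (p, c, r) x = (p, c, r) := by simp [pvStepB, h1, h2, h3]
          rw [List.foldl_cons, hs, ih]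
          simp [h1, h2, h3]

-- ===== VERDICT (by name: the statement is the Claim_ definition above) =====
theorem summarize_experience_py_spec : Claim_equal_summarize_experience_py := by
  intro interactions _
  unfold Spec_summarize_experience_py summarize_experience_py summarize_experience_py_alt
  by_cases h : interactions = []
  · simp [h]
  · simp only [h, if_false]
    rw [pvFold_eq]
    simp
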